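-- pv_equiv track=rewrite | github.com/Hiron2305/ege | homework_tasks/17592982/24_1.py | longest_valid_substring
-- ===== SOURCE A (Python) =====
-- def longest_valid_substring(s):
--     valid_chars = set("09-")
--     max_length = 0
--     start = 0
--     n = len(s)
--
--     while start < n:
--         end = start
--         while end < n and s[end] in valid_chars:
--             end += 1
--         if max_length < end - start:
--             max_str = s[start:end]
--         max_length = max(max_length, end - start)
--         start = end + 1
--
--     return (max_length, max_str)
-- ===== SOURCE B (Python) =====
-- def longest_valid_substring(s):
--     valid = set("09-")
--     n = len(s)
--     # DP right-to-left: run[i] = length of the valid run starting at index i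
--     run = [0] * (n + 1)
--     for i in range(n - 1, -1, -1):
--         run[i] = run[i + 1] + 1 if s[i] in valid else 0
--     # argmax scan: strict '<' keeps the first longest run
--     best_len = 0
--     best = s[0:0]
--     for i in range(n):
--         if best_len < run[i]:
--             best_len = run[i]
--             best = s[i:i + run[i]]
--     return (best_len, best)
-- ===== Notes on version B (the rewrite author's own statement) =====
-- stated objective: alternative
-- what changed: A fuses a nested while-loop that jumps over maximal runs and updates the max on the fly; B instead builds a dynamic-programming array run[i] (length of the valid run starting at i) by one right-to-left pass, then a left-to-right argmax scan over every index picks the first longest run and slices it out.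
import Mathlib
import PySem

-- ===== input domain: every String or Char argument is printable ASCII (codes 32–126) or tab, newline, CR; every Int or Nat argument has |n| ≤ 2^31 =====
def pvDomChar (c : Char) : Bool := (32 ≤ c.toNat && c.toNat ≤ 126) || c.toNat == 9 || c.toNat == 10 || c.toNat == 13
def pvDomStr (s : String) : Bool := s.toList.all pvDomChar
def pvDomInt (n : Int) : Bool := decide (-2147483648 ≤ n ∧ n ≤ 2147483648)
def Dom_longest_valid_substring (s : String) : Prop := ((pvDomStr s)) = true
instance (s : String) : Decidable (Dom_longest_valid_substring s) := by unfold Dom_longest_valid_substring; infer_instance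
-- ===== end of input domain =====

-- B replaces A's fused run-jumping while-loop by a DP run-length array built right-to-left
-- plus an argmax scan over every index (alternative decomposition, not faster).
-- Where A raises UnboundLocalError (no char of {'0','9','-'}), B returns (0, "").

-- ===== PORT A =====
-- membership in set("09-")
def pvValid (c : Char) : Bool := c = '0' || c = '9' || c = '-'

-- inner while: `while end < n and s[end] in valid_chars: end += 1`, as the count of
-- leading valid chars of the suffix s[start:]
def aScan : List Char → Nat
  | [] => 0
  | c :: rest => if pvValid c then aScan rest + 1 else 0

-- outer while-loop; max_str is Option (none = still unbound).
-- s[start:end] = (cs.drop start).take (end-start) (exact: 0 ≤ start ≤ end)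
def aLoop (cs : List Char) (start : Nat) (maxLen : Int) (maxStr : Option (List Char)) :
    Int × Option (List Char) :=
  if h : start < cs.length then
    aLoop cs (start + aScan (cs.drop start) + 1)
      (max maxLen ((aScan (cs.drop start) : Int)))
      (if maxLen < ((aScan (cs.drop start) : Int)) then
        some ((cs.drop start).take (aScan (cs.drop start))) else maxStr)
  else (maxLen, maxStr)
  termination_by cs.length - start
  decreasing_by omega

-- where Python A raises UnboundLocalError (max_str unbound), the port returns "" ;
-- exactly those inputs are excluded by Pre_longest_valid_substring
def longest_valid_substring (s : String) : Int × String :=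
  let r := aLoop s.toList 0 0 none
  (r.1, String.ofList (r.2.getD []))

-- ===== PORT B =====
def bValid (c : Char) : Bool := c = '0' || c = '9' || c = '-'

-- Source B's first pass: run[i] = run[i+1] + 1 if s[i] valid else 0, built right-to-left
-- (the list has length n+1, its last entry is the sentinel 0, exactly as in Source B)
def runArr : List Char → List Nat
  | [] => [0]
  | c :: cs => (if bValid c then (runArr cs).headD 0 + 1 else 0) :: runArr cs

-- Source B's second pass: `for i in range(n)`, ported as a counted loop (fuel = remaining
-- iterations, i the current index); strict '<' keeps the first longest run;
-- s[i:i+run[i]] = (cs.drop i).take run[i]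
def bPick (cs : List Char) (run : List Nat) : Nat → Nat → Int → List Char → Int × List Char
  | 0, _, bl, best => (bl, best)
  | fuel + 1, i, bl, best =>
    if bl < ((run.getD i 0 : Nat) : Int) then
      bPick cs run fuel (i + 1) ((run.getD i 0 : Nat) : Int) ((cs.drop i).take (run.getD i 0))
    else
      bPick cs run fuel (i + 1) bl best

def longest_valid_substring_alt (s : String) : Int × String :=
  let cs := s.toList
  let r := bPick cs (runArr cs) cs.length 0 0 []
  (r.1, String.ofList r.2)

-- ===== PRECONDITION & SPEC =====
-- Python A raises UnboundLocalError iff s contains no character of {'0','9','-'}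
-- (max_str is never assigned); Pre_ excludes exactly those inputs.
def Pre_longest_valid_substring (s : String) : Prop :=
  (s.toList.any fun c => c == '0' || c == '9' || c == '-') = true
instance (s : String) : Decidable (Pre_longest_valid_substring s) := by
  unfold Pre_longest_valid_substring; infer_instance

def pvWitness_longest_valid_substring : String := "a-9b"

def Spec_longest_valid_substring (s : String) (out : Int × String) : Prop :=
  out = longest_valid_substring_alt s
instance (s : String) (out : Int × String) : Decidable (Spec_longest_valid_substring s out) := by
  unfold Spec_longest_valid_substring; infer_instance

-- ===== CLAIM (what is proved, stated in full; the proofs are below) =====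
def Claim_equal_longest_valid_substring : Prop := ∀ (s : String), Dom_longest_valid_substring s → Pre_longest_valid_substring s → Spec_longest_valid_substring s (longest_valid_substring s)

-- ===== LEMMAS AND PROOFS =====

lemma bValid_eq (c : Char) : bValid c = pvValid c := rfl

lemma aScan_tail (l : List Char) (h : 0 < aScan l) : aScan (l.drop 1) = aScan l - 1 := by
  cases l with
  | nil => simp [aScan] at h
  | cons c rest =>
    by_cases hc : pvValid c = true
    · simp [aScan, hc]
    · simp [aScan, hc] at h

lemma aScan_drop (l : List Char) (j : Nat) (hj : j ≤ aScan l) :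
    aScan (l.drop j) = aScan l - j := by
  induction j with
  | zero => simp
  | succ j ih =>
    have h1 := ih (by omega)
    have h2 : l.drop (j + 1) = (l.drop j).drop 1 := by
      rw [List.drop_drop]
    have hpos : 0 < aScan (l.drop j) := by omega
    rw [h2, aScan_tail _ hpos, h1]
    omega

lemma runArr_ne_nil (l : List Char) : runArr l ≠ [] := by
  cases l <;> simp [runArr]

lemma runArr_getD (cs : List Char) (i : Nat) :
    (runArr cs).getD i 0 = aScan (cs.drop i) := by
  induction cs generalizing i with
  | nil => cases i <;> simp [runArr, aScan]
  | cons c rest ih =>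
    cases i with
    | zero =>
      have hh : (runArr rest).head?.getD 0 = aScan rest := by
        have h0 := ih 0
        cases hr : runArr rest with
        | nil => exact absurd hr (runArr_ne_nil rest)
        | cons x xs => simp [hr] at h0 ⊢; simpa using h0
      simp only [runArr, bValid_eq, List.getD_cons_zero, List.headD_eq_head?_getD, hh,
        List.drop_zero]
      simp [aScan]
    | succ i =>
      simp only [runArr, List.getD_cons_succ, List.drop_succ_cons]
      exact ih i

-- skipping indices whose run value does not beat bl leaves bPick's state unchanged
lemma bPick_skip (cs : List Char) (n : Nat) (run : List Nat) (bl : Int) (best : List Char)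
    (d : Nat) : ∀ (a : Nat),
    (∀ i, a ≤ i → i < a + d → ¬ bl < ((run.getD i 0 : Nat) : Int)) →
    bPick cs run (n - a) a bl best = bPick cs run (n - (a + d)) (a + d) bl best := by
  induction d with
  | zero => intro a _; rfl
  | succ d ih =>
    intro a hle
    by_cases h : a < n
    · have hf : n - a = (n - (a + 1)) + 1 := by omega
      rw [hf]
      show bPick cs run ((n - (a + 1)) + 1) a bl best = _
      rw [bPick, if_neg (hle a le_rfl (by omega))]
      have := ih (a + 1) (fun i h1 h2 => hle i (by omega) (by omega))
      have harg : a + 1 + d = a + (d + 1) := by omega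
      rw [harg] at this
      exact this
    · have h1 : n - a = 0 := by omega
      have h2 : n - (a + (d + 1)) = 0 := by omega
      rw [h1, h2]
      rfl

lemma main_inv (cs : List Char) (start : Nat) (ml : Int) (ms : Option (List Char))
    (hml : 0 ≤ ml) :
    (aLoop cs start ml ms).1 =
      (bPick cs (runArr cs) (cs.length - start) start ml (ms.getD [])).1 ∧
    (aLoop cs start ml ms).2.getD [] =
      (bPick cs (runArr cs) (cs.length - start) start ml (ms.getD [])).2 := by
  by_cases h : start < cs.length
  · rw [aLoop, dif_pos h]
    set k := aScan (cs.drop start) with hk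
    have hrun : (runArr cs).getD start 0 = k := by rw [runArr_getD]
    have hrun_in : ∀ i, start + 1 ≤ i → i < start + 1 + k →
        ((runArr cs).getD i 0 : Int) = (k : Int) - ((i - start : Nat) : Int) := by
      intro i h1 h2
      have hj : i - start ≤ k := by omega
      have hdd : cs.drop i = (cs.drop start).drop (i - start) := by
        rw [List.drop_drop]; congr 1; omega
      rw [runArr_getD, hdd, aScan_drop _ _ (by rw [← hk]; exact hj), ← hk]
      omega
    have hf : cs.length - start = (cs.length - (start + 1)) + 1 := by omega
    by_cases hc : ml < (k : Int)
    · rw [if_pos hc, hf]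
      show _ ∧ (aLoop cs (start + k + 1) (max ml (k:Int)) (some ((cs.drop start).take k))).2.getD []
        = (bPick cs (runArr cs) ((cs.length - (start + 1)) + 1) start ml (ms.getD [])).2
      rw [bPick, hrun, if_pos hc]
      have hskip := bPick_skip cs cs.length (runArr cs) ((k : Nat) : Int)
        ((cs.drop start).take k) k (start + 1)
        (by intro i h1 h2
            rw [hrun_in i h1 h2]
            have : (0 : Int) ≤ ((i - start : Nat) : Int) := by positivity
            omega)
      have harr : start + 1 + k = start + k + 1 := by omega
      rw [harr] at hskip
      rw [hskip]
      have hmax : max ml (k : Int) = (k : Int) := by omega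
      have hres := main_inv cs (start + k + 1) (max ml (k : Int))
        (some ((cs.drop start).take k)) (by omega)
      rw [hmax] at hres ⊢
      simpa using hres
    · rw [if_neg hc, hf]
      show _ ∧ (aLoop cs (start + k + 1) (max ml (k:Int)) ms).2.getD []
        = (bPick cs (runArr cs) ((cs.length - (start + 1)) + 1) start ml (ms.getD [])).2
      rw [bPick, hrun, if_neg hc]
      have hskip := bPick_skip cs cs.length (runArr cs) ml (ms.getD []) k (start + 1)
        (by intro i h1 h2
            rw [hrun_in i h1 h2]
            have hx : ((i - start : Nat) : Int) ≥ 0 := by positivity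
            omega)
      have harr : start + 1 + k = start + k + 1 := by omega
      rw [harr] at hskip
      rw [hskip]
      have hmax : max ml (k : Int) = ml := by omega
      rw [hmax]
      exact main_inv cs (start + k + 1) ml ms hml
  · have h0 : cs.length - start = 0 := by omega
    rw [aLoop, dif_neg h, h0]
    simp [bPick]
  termination_by cs.length - start
  decreasing_by all_goals omega

-- ===== VERDICT (by name: the statement is the Claim_ definition above) =====
theorem longest_valid_substring_spec : Claim_equal_longest_valid_substring := by
  intro s _ _
  unfold Spec_longest_valid_substring longest_valid_substring longest_valid_substring_alt
  have h := main_inv s.toList 0 0 none (le_refl 0)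
  simp only [Option.getD_none] at h
  exact Prod.ext h.1 (congrArg String.ofList h.2)
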